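-- pv_equiv track=rewrite | github.com/pustotnik/zenmake | tests/func_test.py | getTargetPattern
-- ===== SOURCE A (Python) =====
-- def getTargetPattern(env, features):
--     kind = 'file'
--     fileNamePattern = '%s'
--     for feature in features:
--         # find pattern via brute force :)
--         key = feature + '_PATTERN'
--         if key not in env:
--             continue
--         fileNamePattern = env[key]
--         if feature.endswith('program'):
--             kind = 'exe'
--         elif feature.endswith('shlib'):
--             kind = 'shlib'
--         elif feature.endswith('stlib'):
--             kind = 'stlib'
--
--     return fileNamePattern, kind
-- ===== SOURCE B (Python) =====
-- def getTargetPattern(env, features):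
--     fileNamePattern = '%s'
--     for feature in reversed(features):
--         key = feature + '_PATTERN'
--         if key in env:
--             fileNamePattern = env[key]
--             break
--     kind = 'file'
--     for feature in reversed(features):
--         if feature + '_PATTERN' not in env:
--             continue
--         if feature.endswith('program'):
--             kind = 'exe'
--             break
--         if feature.endswith('shlib'):
--             kind = 'shlib'
--             break
--         if feature.endswith('stlib'):
--             kind = 'stlib'
--             break
--     return fileNamePattern, kind
-- ===== Notes on version B (the rewrite author's own statement) =====
-- stated objective: alternative
-- what changed: Replaced A's single fused forward scan with accumulated state by two independent reverse searches: the pattern is the first match from the end, and the kind is the first suffix-matching env-present feature from the end, each with early exit.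
import Mathlib
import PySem

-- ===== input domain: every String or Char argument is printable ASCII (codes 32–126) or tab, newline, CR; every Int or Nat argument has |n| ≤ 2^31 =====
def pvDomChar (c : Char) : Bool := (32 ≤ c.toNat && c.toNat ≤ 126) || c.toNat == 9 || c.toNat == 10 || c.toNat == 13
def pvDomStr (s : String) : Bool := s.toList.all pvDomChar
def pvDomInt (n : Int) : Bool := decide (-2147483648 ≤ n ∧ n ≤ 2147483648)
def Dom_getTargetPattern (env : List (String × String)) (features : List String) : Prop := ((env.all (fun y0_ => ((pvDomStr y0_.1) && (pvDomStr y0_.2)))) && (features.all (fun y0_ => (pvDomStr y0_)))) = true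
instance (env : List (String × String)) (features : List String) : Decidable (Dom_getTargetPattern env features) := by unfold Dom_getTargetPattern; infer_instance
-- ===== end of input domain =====

-- B computes the same result by two independent reverse early-exit searches instead of A's fused forward scan (alternative decomposition, same cost).

-- ===== PORT A =====
def loopA (env : List (String × String)) (st : String × String) : List String → String × String
  | [] => st
  | f :: fs =>
    let key := f ++ "_PATTERN"
    match List.lookup key env with
    | none => loopA env st fs
    | some v =>
      let kind := if PySem.Str.endswith f "program" then "exe"
        else if PySem.Str.endswith f "shlib" then "shlib"
        else if PySem.Str.endswith f "stlib" then "stlib"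
        else st.2
      loopA env (v, kind) fs

def getTargetPattern (env : List (String × String)) (features : List String) : String × String :=
  loopA env ("%s", "file") features

-- ===== PORT B =====
def findPat (env : List (String × String)) : List String → String
  | [] => "%s"
  | f :: fs =>
    match List.lookup (f ++ "_PATTERN") env with
    | some v => v
    | none => findPat env fs

def findKind (env : List (String × String)) : List String → String
  | [] => "file"
  | f :: fs =>
    if (List.lookup (f ++ "_PATTERN") env).isSome then
      if PySem.Str.endswith f "program" then "exe"
      else if PySem.Str.endswith f "shlib" then "shlib"
      else if PySem.Str.endswith f "stlib" then "stlib"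
      else findKind env fs
    else findKind env fs

def getTargetPattern_alt (env : List (String × String)) (features : List String) : String × String :=
  (findPat env features.reverse, findKind env features.reverse)

-- ===== PRECONDITION & SPEC =====
def Spec_getTargetPattern (env : List (String × String)) (features : List String) (out : String × String) : Prop := out = getTargetPattern_alt env features
instance (env : List (String × String)) (features : List String) (out : String × String) : Decidable (Spec_getTargetPattern env features out) := by unfold Spec_getTargetPattern; infer_instance

-- ===== CLAIM (what is proved, stated in full; the proofs are below) =====
def Claim_equal_getTargetPattern : Prop := ∀ (env : List (String × String)) (features : List String), Dom_getTargetPattern env features → Spec_getTargetPattern env features (getTargetPattern env features)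

-- ===== LEMMAS AND PROOFS =====
-- Defaulted variants used only by the proof.
def findPatD (env : List (String × String)) (d : String) : List String → String
  | [] => d
  | f :: fs =>
    match List.lookup (f ++ "_PATTERN") env with
    | some v => v
    | none => findPatD env d fs

def findKindD (env : List (String × String)) (d : String) : List String → String
  | [] => d
  | f :: fs =>
    if (List.lookup (f ++ "_PATTERN") env).isSome then
      if PySem.Str.endswith f "program" then "exe"
      else if PySem.Str.endswith f "shlib" then "shlib"
      else if PySem.Str.endswith f "stlib" then "stlib"
      else findKindD env d fs
    else findKindD env d fs

theorem findPatD_eq (env : List (String × String)) (l : List String) :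
    findPatD env "%s" l = findPat env l := by
  induction l with
  | nil => rfl
  | cons f fs ih => simp [findPatD, findPat, ih]

theorem findKindD_eq (env : List (String × String)) (l : List String) :
    findKindD env "file" l = findKind env l := by
  induction l with
  | nil => rfl
  | cons f fs ih => simp only [findKindD, ih]; rfl

theorem findPatD_append (env : List (String × String)) (l : List String) (f d : String) :
    findPatD env d (l ++ [f]) =
      findPatD env (match List.lookup (f ++ "_PATTERN") env with
                    | some v => v | none => d) l := by
  induction l with
  | nil => simp [findPatD]
  | cons g gs ih => simp only [List.cons_append, findPatD, ih]

theorem findKindD_append (env : List (String × String)) (l : List String) (f d : String) :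
    findKindD env d (l ++ [f]) =
      findKindD env (if (List.lookup (f ++ "_PATTERN") env).isSome then
          if PySem.Str.endswith f "program" then "exe"
          else if PySem.Str.endswith f "shlib" then "shlib"
          else if PySem.Str.endswith f "stlib" then "stlib"
          else d
        else d) l := by
  induction l with
  | nil => simp only [List.nil_append, findKindD]
  | cons g gs ih => simp only [List.cons_append, findKindD, ih]

theorem loopA_eq (env : List (String × String)) (fs : List String) (st : String × String) :
    loopA env st fs = (findPatD env st.1 fs.reverse, findKindD env st.2 fs.reverse) := by
  induction fs generalizing st with
  | nil => rfl
  | cons f fs ih =>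
    simp only [loopA, List.reverse_cons, findPatD_append, findKindD_append]
    cases h : List.lookup (f ++ "_PATTERN") env with
    | none => simpa using ih st
    | some v => simpa using ih (v, _)


-- ===== VERDICT (by name: the statement is the Claim_ definition above) =====
theorem getTargetPattern_spec : Claim_equal_getTargetPattern := by
  intro env features _
  unfold Spec_getTargetPattern getTargetPattern getTargetPattern_alt
  rw [loopA_eq, findPatD_eq, findKindD_eq]
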